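-- pv_equiv track=rewrite | github.com/Russolves/Grade-Report-A.I. | Apollo_predict.py | compare_score
-- ===== SOURCE A (Python) =====
-- def compare_score(compscore_dict, predict_dict):
--     #Initialize the dictionary we are returning (with the key being the student predicted and the value being the student compared)
--     match_dict = {}
--     for i in predict_dict:
--         #Initialize a temporary dictionary for calculating the closest score (through using 'min()' on the absolute value of difference)
--         diff = {}
--         for j in compscore_dict:
--             diff[j] = abs(predict_dict[i] - compscore_dict[j])
--         #Obtain the key (stkey) to the value of the closest score
--         min_value = min(diff.values())
--         closest_student = [k for k in diff if diff[k] == min_value]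
--         #For each stkey of prediction student, add stkey of the comparison student (with closest score); note that [0] is used because list comprehension returns a list containing the one stkey comparison student value so it has to be sliced
--         match_dict[i] = closest_student[0]
--     return match_dict
-- ===== SOURCE B (Python) =====
-- def _closest(items, p):
--     # single pass: running (best_key, best_diff), strict '<' keeps the first minimum
--     best_key, best_diff = items[0][0], abs(p - items[0][1])
--     for k, v in items[1:]:
--         d = abs(p - v)
--         if d < best_diff:
--             best_key, best_diff = k, d
--     return best_key
--
-- def compare_score(compscore_dict, predict_dict):
--     items = list(compscore_dict.items())
--     match_dict = {}
--     for name, p in predict_dict.items():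
--         match_dict[name] = _closest(items, p)
--     return match_dict
-- ===== Notes on version B (the rewrite author's own statement) =====
-- stated objective: simpler
-- what changed: B replaces A's per-prediction three-pass scheme (build a dict of all absolute differences, min() over its values, list-comprehension filter for the argmin keys, take [0]) by a single running-minimum pass over the comparison items with strict '<' keeping the first minimum, with no intermediate dict.
import Mathlib
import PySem

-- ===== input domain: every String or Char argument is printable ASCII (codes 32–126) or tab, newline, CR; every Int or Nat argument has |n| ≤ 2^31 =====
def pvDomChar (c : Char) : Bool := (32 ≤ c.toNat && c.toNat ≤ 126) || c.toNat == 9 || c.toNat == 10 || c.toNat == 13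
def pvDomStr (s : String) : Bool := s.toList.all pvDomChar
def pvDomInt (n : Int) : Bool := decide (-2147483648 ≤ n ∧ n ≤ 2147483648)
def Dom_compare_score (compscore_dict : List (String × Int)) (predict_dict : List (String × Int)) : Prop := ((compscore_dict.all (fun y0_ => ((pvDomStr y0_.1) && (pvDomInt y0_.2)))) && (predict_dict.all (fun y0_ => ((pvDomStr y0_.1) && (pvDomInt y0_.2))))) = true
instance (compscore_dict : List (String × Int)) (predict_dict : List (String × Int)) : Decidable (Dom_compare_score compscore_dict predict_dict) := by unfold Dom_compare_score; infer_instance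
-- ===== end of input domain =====

-- B replaces A's per-prediction dict-of-diffs + min() + filter-[0] by one running-minimum pass (simpler, no intermediate dict); equal on Pre_.

-- ===== PORT A =====
def compare_score (compscore_dict : List (String × Int)) (predict_dict : List (String × Int)) : List (String × String) :=
  let csd := PySem.Dict.ofList compscore_dict
  let pdd := PySem.Dict.ofList predict_dict
  (pdd.keys.foldl (fun (match_dict : PySem.Dict String String) i =>
      let diff : PySem.Dict String Int :=
        csd.keys.foldl (fun d j => d.insert j |pdd.getD i 0 - csd.getD j 0|) PySem.Dict.empty
      -- min() on an empty dict raises ValueError in Python: Pre_ excludes that; the defaults below are never reached on Pre_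
      let min_value := (PySem.List.min? diff.values (fun v => v)).getD 0
      let closest_student := diff.keys.filter (fun k => diff.getD k 0 == min_value)
      match_dict.insert i (closest_student.head?.getD ""))
    PySem.Dict.empty).items

-- ===== PORT B =====
-- items[0] raises IndexError in Python on an empty dict: Pre_ excludes that; the [] branch is never reached on Pre_
def closestAlt (items : List (String × Int)) (p : Int) : String :=
  match items with
  | [] => ""
  | (k0, v0) :: rest =>
    (rest.foldl (fun best kv => if |p - kv.2| < best.2 then (kv.1, |p - kv.2|) else best)
      (k0, |p - v0|)).1

def compare_score_alt (compscore_dict : List (String × Int)) (predict_dict : List (String × Int)) : List (String × String) :=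
  let items := (PySem.Dict.ofList compscore_dict).items
  ((PySem.Dict.ofList predict_dict).items.foldl
     (fun (match_dict : PySem.Dict String String) np => match_dict.insert np.1 (closestAlt items np.2))
     PySem.Dict.empty).items

-- ===== PRECONDITION & SPEC =====
-- Pre_ excludes exactly the inputs where Python A raises ValueError (min() of an empty sequence):
-- a nonempty prediction dict with an empty comparison dict; Python B raises IndexError there too.
def Pre_compare_score (compscore_dict : List (String × Int)) (predict_dict : List (String × Int)) : Prop :=
  predict_dict ≠ [] → compscore_dict ≠ []
instance (compscore_dict : List (String × Int)) (predict_dict : List (String × Int)) : Decidable (Pre_compare_score compscore_dict predict_dict) := by unfold Pre_compare_score; infer_instance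
def pvWitness_compare_score : (List (String × Int)) × (List (String × Int)) := ([("a", 1), ("b", 5)], [("p", 4)])
def Spec_compare_score (compscore_dict : List (String × Int)) (predict_dict : List (String × Int)) (out : List (String × String)) : Prop := out = compare_score_alt compscore_dict predict_dict
instance (compscore_dict : List (String × Int)) (predict_dict : List (String × Int)) (out : List (String × String)) : Decidable (Spec_compare_score compscore_dict predict_dict out) := by unfold Spec_compare_score; infer_instance

-- ===== CLAIM (what is proved, stated in full; the proofs are below) =====
def Claim_equal_compare_score : Prop := ∀ (compscore_dict : List (String × Int)) (predict_dict : List (String × Int)), Dom_compare_score compscore_dict predict_dict → Pre_compare_score compscore_dict predict_dict → Spec_compare_score compscore_dict predict_dict (compare_score compscore_dict predict_dict)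

-- ===== LEMMAS AND PROOFS =====

-- A's inner-loop body, factored for the proof (compare_score_eq_aSelect below is rfl)
def aSelect (csd : PySem.Dict String Int) (p : Int) : String :=
  let diff : PySem.Dict String Int :=
    csd.keys.foldl (fun d j => d.insert j |p - csd.getD j 0|) PySem.Dict.empty
  let min_value := (PySem.List.min? diff.values (fun v => v)).getD 0
  let closest_student := diff.keys.filter (fun k => diff.getD k 0 == min_value)
  closest_student.head?.getD ""

theorem compare_score_eq_aSelect (cs pd : List (String × Int)) :
    compare_score cs pd =
      ((PySem.Dict.ofList pd : PySem.Dict String Int).keys.foldl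
        (fun (md : PySem.Dict String String) i =>
          md.insert i (aSelect (PySem.Dict.ofList cs) ((PySem.Dict.ofList pd : PySem.Dict String Int).getD i 0)))
        PySem.Dict.empty).items := rfl

-- the running min over the .2 projection is bounded by its start
theorem minFold_le (t : List (String × Int)) (d : Int) :
    t.foldl (fun a kv => min a kv.2) d ≤ d := by
  have h := (PySem.List.foldl_min_le (t.map Prod.snd) d).1
  rw [List.foldl_map] at h
  exact h

theorem firstMinFold (t : List (String × Int)) (b : String × Int) :
    ((b :: t).filter (fun kv => kv.2 == t.foldl (fun a kv => min a kv.2) b.2)).head?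
      = some (t.foldl (fun best kv => if kv.2 < best.2 then kv else best) b) := by
  induction t generalizing b with
  | nil => simp
  | cons x tt ih =>
    have hstep : (if x.2 < b.2 then x else b).2 = min b.2 x.2 := by
      split <;> omega
    have hM : tt.foldl (fun a kv => min a kv.2) (min b.2 x.2)
        = tt.foldl (fun a kv => min a kv.2) ((if x.2 < b.2 then x else b).2) := by rw [hstep]
    have hle : tt.foldl (fun a kv => min a kv.2) (min b.2 x.2) ≤ min b.2 x.2 :=
      minFold_le _ _
    have ih' := ih (if x.2 < b.2 then x else b)
    rw [← hM] at ih'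
    simp only [List.foldl_cons]
    rw [← ih']
    set M := tt.foldl (fun a kv => min a kv.2) (min b.2 x.2) with hMdef
    by_cases hx : x.2 < b.2
    · have hb : (b.2 == M) = false := by
        simp only [beq_eq_false_iff_ne, ne_eq]; omega
      simp [List.filter_cons, hb, if_pos hx]
    · by_cases hbm : b.2 = M
      · have hb : (b.2 == M) = true := beq_iff_eq.mpr hbm
        simp [List.filter_cons, hb, if_neg hx]
      · have hxb : (x.2 == M) = false := by
          simp only [beq_eq_false_iff_ne, ne_eq]; omega
        have hb : (b.2 == M) = false := by
          simp only [beq_eq_false_iff_ne, ne_eq]; exact hbm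
        simp [hb, hxb, if_neg hx]
theorem aSelect_eq_closestAlt (d : PySem.Dict String Int) (hnd : d.keys.Nodup) (p : Int) :
    aSelect d p = closestAlt d.items p := by
  have hndm : (d.items.map Prod.fst).Nodup := by simpa [PySem.Dict.keys] using hnd
  have hdiff : d.keys.foldl (fun dd j => dd.insert j |p - d.getD j 0|) PySem.Dict.empty
      = d.items.foldl (fun dd kv => dd.insert kv.1 |p - kv.2|) PySem.Dict.empty := by
    simp only [PySem.Dict.keys, List.foldl_map]
    apply PySem.List.foldl_congr_mem'
    intro x hx acc
    obtain ⟨k, v⟩ := x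
    rw [PySem.Dict.getD_of_mem_items d hx hnd]
  have hitems : (d.items.foldl (fun dd kv => dd.insert kv.1 |p - kv.2|) PySem.Dict.empty).items
      = d.items.map (fun kv => (kv.1, |p - kv.2|)) := by
    have h := PySem.Dict.items_foldl_insert_fresh (l := d.items) (k := Prod.fst)
      (v := fun kv => |p - kv.2|) (d := PySem.Dict.empty)
      (by intro a _; simp) (by exact hndm)
    simpa using h
  cases hL : d.items with
  | nil =>
    have hk : d.keys = [] := by simp [PySem.Dict.keys, hL]
    simp [aSelect, closestAlt, hk]
  | cons hd rest =>
    obtain ⟨a, b⟩ := hd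
    simp only [aSelect]
    rw [hdiff]
    set F := d.items.foldl (fun dd kv => dd.insert kv.1 |p - kv.2|) PySem.Dict.empty with hF
    have hFnd : F.keys.Nodup := by
      simp only [PySem.Dict.keys, hitems, List.map_map]
      simpa [Function.comp] using hndm
    have hkeys : F.keys = (d.items.map (fun kv => (kv.1, |p - kv.2|))).map (fun x => x.1) := by
      simp only [PySem.Dict.keys, hitems]
    have hvals : F.values = (d.items.map (fun kv => (kv.1, |p - kv.2|))).map (fun x => x.2) := by
      simp only [PySem.Dict.values, hitems]
    have hfilter : ∀ m : Int,
        ((d.items.map (fun kv => (kv.1, |p - kv.2|))).map (fun x => x.1)).filter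
          (fun k => F.getD k 0 == m)
        = ((d.items.map (fun kv => (kv.1, |p - kv.2|))).filter (fun kv => kv.2 == m)).map (fun x => x.1) := by
      intro m
      rw [List.filter_map]
      congr 1
      apply List.filter_congr
      intro kv hkv
      obtain ⟨k, v⟩ := kv
      rw [← hitems] at hkv
      simp only [Function.comp]
      rw [PySem.Dict.getD_of_mem_items F hkv hFnd]
    rw [hkeys, hvals, hfilter, hL]
    have hm : (PySem.List.min? ((((a, b) :: rest).map (fun kv => (kv.1, |p - kv.2|))).map (fun x => x.2))
        (fun v => v)).getD 0
        = (rest.map (fun kv => (kv.1, |p - kv.2|))).foldl (fun acc kv => min acc kv.2) |p - b| := by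
      simp only [List.map_cons, PySem.List.min?_id_cons, Option.getD_some, List.foldl_map]
    rw [hm]
    have hfm := firstMinFold (rest.map (fun kv => (kv.1, |p - kv.2|))) ((a, |p - b|))
    simp only [List.map_cons] at *
    rw [List.head?_map, hfm]
    simp only [Option.map_some, Option.getD_some]
    simp [closestAlt, List.foldl_map]


-- ===== VERDICT (by name: the statement is the Claim_ definition above) =====
theorem compare_score_spec : Claim_equal_compare_score := by
  intro cs pd _ _
  unfold Spec_compare_score
  rw [compare_score_eq_aSelect]
  show _ = ((PySem.Dict.ofList pd : PySem.Dict String Int).items.foldl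
        (fun (md : PySem.Dict String String) np =>
          md.insert np.1 (closestAlt (PySem.Dict.ofList cs : PySem.Dict String Int).items np.2))
        PySem.Dict.empty).items
  congr 1
  simp only [PySem.Dict.keys, List.foldl_map]
  apply PySem.List.foldl_congr_mem'
  intro x hx acc
  obtain ⟨k, v⟩ := x
  rw [PySem.Dict.getD_of_mem_items _ hx (PySem.Dict.nodup_keys_ofList pd)]
  rw [aSelect_eq_closestAlt _ (PySem.Dict.nodup_keys_ofList cs)]
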